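-- pv_equiv track=rewrite | github.com/diffwoak/undergraduate_materials | 大三2/大数据/final/compress.py | init_transactions
-- ===== SOURCE A (Python) =====
-- def init_transactions(database):
--     compressed = []
--     item_mapping = {}
--     index = 0
--     for transaction in database:
--         compressed_transaction = 0
--         for item in transaction:
--             if item not in item_mapping:
--                 item_mapping[item] = index
--                 index += 1
--             compressed_transaction |= (1 << item_mapping[item])
--         compressed.append(compressed_transaction)
--     return compressed, item_mapping
-- ===== SOURCE B (Python) =====
-- def _mask(transaction, item_mapping):
--     m = 0
--     for item in transaction:
--         m |= 1 << item_mapping[item]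
--     return m
--
--
-- def init_transactions(database):
--     item_mapping = {}
--     for transaction in database:
--         for item in transaction:
--             if item not in item_mapping:
--                 item_mapping[item] = len(item_mapping)
--     compressed = [_mask(transaction, item_mapping) for transaction in database]
--     return compressed, item_mapping
-- ===== Notes on version B (the rewrite author's own statement) =====
-- stated objective: alternative
-- what changed: B builds the complete item-to-index mapping in a dedicated first pass over all transactions, then computes each bitmask in a second pass (a comprehension over the finished mapping), instead of A's single interleaved pass that assigns indices while OR-ing masks; B also drops the explicit index counter in favour of len(item_mapping).
import Mathlib
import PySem

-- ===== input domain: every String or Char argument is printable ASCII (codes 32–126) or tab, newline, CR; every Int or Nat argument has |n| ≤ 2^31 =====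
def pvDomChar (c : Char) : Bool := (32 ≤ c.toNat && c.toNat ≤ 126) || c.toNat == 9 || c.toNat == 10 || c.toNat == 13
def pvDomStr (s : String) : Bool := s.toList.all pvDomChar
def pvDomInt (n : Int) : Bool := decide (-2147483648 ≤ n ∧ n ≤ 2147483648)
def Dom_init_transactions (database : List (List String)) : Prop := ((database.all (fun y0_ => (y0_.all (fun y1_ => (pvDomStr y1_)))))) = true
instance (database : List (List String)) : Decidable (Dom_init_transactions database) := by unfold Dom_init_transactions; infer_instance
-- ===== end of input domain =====

-- B builds the full item→bit mapping in a first pass, then computes the masks in a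
-- second pass over the finished mapping (alternative decomposition, same cost as A).


-- ===== PORT A =====
-- inner loop body: state (compressed_transaction, item_mapping, index), one item;
-- item_mapping[item] is read after the (possible) insertion, so the key is always
-- present and getD _ 0 returns exactly the stored value
def aStep (s : Int × PySem.Dict String Int × Int) (item : String) :
    Int × PySem.Dict String Int × Int :=
  if s.2.1.contains item then
    (PySem.Int.bor s.1 ((1 : Int) <<< (s.2.1.getD item 0).toNat), s.2.1, s.2.2)
  else
    (PySem.Int.bor s.1 ((1 : Int) <<< ((s.2.1.insert item s.2.2).getD item 0).toNat),
     s.2.1.insert item s.2.2, s.2.2 + 1)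

-- outer loop body: state (compressed, item_mapping, index), one transaction
def aOuter (st : List Int × PySem.Dict String Int × Int) (transaction : List String) :
    List Int × PySem.Dict String Int × Int :=
  let r := transaction.foldl aStep (0, st.2.1, st.2.2)
  (st.1 ++ [r.1], r.2.1, r.2.2)

def init_transactions (database : List (List String)) : List Int × (List (String × Int)) :=
  let st := database.foldl aOuter ([], PySem.Dict.empty, 0)
  (st.1, st.2.1.items)

-- ===== PORT B =====
-- first pass: record each unseen item with index len(item_mapping)
def bAdd (m : PySem.Dict String Int) (item : String) : PySem.Dict String Int :=
  if m.contains item then m else m.insert item (m.size : Int)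

def bAddT (m : PySem.Dict String Int) (transaction : List String) : PySem.Dict String Int :=
  transaction.foldl bAdd m

-- second pass helper _mask
def bMask (transaction : List String) (item_mapping : PySem.Dict String Int) : Int :=
  transaction.foldl
    (fun acc item => PySem.Int.bor acc ((1 : Int) <<< (item_mapping.getD item 0).toNat)) 0

def init_transactions_alt (database : List (List String)) : List Int × (List (String × Int)) :=
  let item_mapping := database.foldl bAddT PySem.Dict.empty
  (database.map (fun t => bMask t item_mapping), item_mapping.items)

-- ===== PRECONDITION & SPEC =====
def Spec_init_transactions (database : List (List String)) (out : List Int × (List (String × Int))) : Prop := out = init_transactions_alt database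
instance (database : List (List String)) (out : List Int × (List (String × Int))) : Decidable (Spec_init_transactions database out) := by unfold Spec_init_transactions; infer_instance

-- ===== CLAIM (what is proved, stated in full; the proofs are below) =====
def Claim_equal_init_transactions : Prop := ∀ (database : List (List String)), Dom_init_transactions database → Spec_init_transactions database (init_transactions database)

-- ===== LEMMAS AND PROOFS =====

-- bAdd never disturbs an already-present key
theorem get?_bAdd_of_contains (m : PySem.Dict String Int) (x i : String)
    (h : m.contains i = true) : (bAdd m x).get? i = m.get? i := by
  unfold bAdd
  split_ifs with hx
  · rfl
  · have hne : i ≠ x := by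
      intro e; rw [e] at h; rw [h] at hx; exact absurd rfl hx
    rw [PySem.Dict.get?_insert, if_neg hne]

theorem contains_bAdd_of_contains (m : PySem.Dict String Int) (x i : String)
    (h : m.contains i = true) : (bAdd m x).contains i = true := by
  unfold bAdd
  split_ifs with hx
  · exact h
  · rw [PySem.Dict.contains_insert]; simp [h]

theorem contains_bAddT_of_contains (t : List String) (m : PySem.Dict String Int) (i : String)
    (h : m.contains i = true) : (bAddT m t).contains i = true := by
  induction t generalizing m with
  | nil => exact h
  | cons x t ih => exact ih _ (contains_bAdd_of_contains m x i h)

theorem get?_bAddT_of_contains (t : List String) (m : PySem.Dict String Int) (i : String)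
    (h : m.contains i = true) : (bAddT m t).get? i = m.get? i := by
  induction t generalizing m with
  | nil => rfl
  | cons x t ih =>
    calc (bAddT (bAdd m x) t).get? i = (bAdd m x).get? i :=
          ih _ (contains_bAdd_of_contains m x i h)
      _ = m.get? i := get?_bAdd_of_contains m x i h

theorem getD_bAddT_of_contains (t : List String) (m : PySem.Dict String Int) (i : String)
    (h : m.contains i = true) : (bAddT m t).getD i 0 = m.getD i 0 := by
  rw [PySem.Dict.getD_eq_get?_getD, PySem.Dict.getD_eq_get?_getD, get?_bAddT_of_contains t m i h]

theorem contains_bAddT_of_mem (t : List String) (m : PySem.Dict String Int) (i : String)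
    (h : i ∈ t) : (bAddT m t).contains i = true := by
  induction t generalizing m with
  | nil => cases h
  | cons x t ih =>
    rcases List.mem_cons.mp h with h | h
    · subst h
      refine contains_bAddT_of_contains t (bAdd m i) i ?_
      unfold bAdd
      split_ifs with hx
      · exact hx
      · exact PySem.Dict.contains_insert_self _ _ _
    · exact ih _ h

-- stability of lookups across the remaining transactions
theorem get?_foldl_bAddT_of_contains (db : List (List String)) (m : PySem.Dict String Int)
    (i : String) (h : m.contains i = true) :
    (db.foldl bAddT m).get? i = m.get? i := by
  induction db generalizing m with
  | nil => rfl
  | cons t db ih =>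
    calc (db.foldl bAddT (bAddT m t)).get? i = (bAddT m t).get? i :=
          ih _ (contains_bAddT_of_contains t m i h)
      _ = m.get? i := get?_bAddT_of_contains t m i h

theorem getD_foldl_bAddT_of_contains (db : List (List String)) (m : PySem.Dict String Int)
    (i : String) (h : m.contains i = true) :
    (db.foldl bAddT m).getD i 0 = m.getD i 0 := by
  rw [PySem.Dict.getD_eq_get?_getD, PySem.Dict.getD_eq_get?_getD,
      get?_foldl_bAddT_of_contains db m i h]

-- A's inner loop = extend the mapping with bAdd, then mask against the extended mapping
theorem inner_eq (t : List String) (m : PySem.Dict String Int) (mask : Int) :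
    t.foldl aStep (mask, m, (m.size : Int)) =
      (t.foldl (fun acc item =>
          PySem.Int.bor acc ((1 : Int) <<< ((bAddT m t).getD item 0).toNat)) mask,
       bAddT m t, ((bAddT m t).size : Int)) := by
  induction t generalizing m mask with
  | nil => rfl
  | cons x t ih =>
    by_cases hx : m.contains x = true
    · have hb : bAdd m x = m := by simp [bAdd, hx]
      have hT : bAddT m (x :: t) = bAddT m t := by
        rw [show bAddT m (x :: t) = bAddT (bAdd m x) t from rfl, hb]
      rw [hT, List.foldl_cons, List.foldl_cons]
      have hstep : aStep (mask, m, (m.size : Int)) x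
          = (PySem.Int.bor mask ((1 : Int) <<< (m.getD x 0).toNat), m, (m.size : Int)) := by
        simp [aStep, hx]
      rw [hstep, ih m, getD_bAddT_of_contains t m x hx]
    · have hxf : m.contains x = false := by simpa using hx
      have hb : bAdd m x = m.insert x (m.size : Int) := by simp [bAdd, hxf]
      have hT : bAddT m (x :: t) = bAddT (m.insert x (m.size : Int)) t := by
        rw [show bAddT m (x :: t) = bAddT (bAdd m x) t from rfl, hb]
      rw [hT, List.foldl_cons, List.foldl_cons]
      have hstep : aStep (mask, m, (m.size : Int)) x
          = (PySem.Int.bor mask ((1 : Int) <<< ((m.insert x (m.size : Int)).getD x 0).toNat),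
             m.insert x (m.size : Int), (m.size : Int) + 1) := by
        simp [aStep, hxf]
      have hsz : ((m.insert x (m.size : Int)).size : Int) = (m.size : Int) + 1 := by
        rw [PySem.Dict.size_insert]
        simp [hxf]
      rw [hstep, ← hsz, ih (m.insert x (m.size : Int)),
          getD_bAddT_of_contains t _ x (PySem.Dict.contains_insert_self _ _ _)]

-- A's outer loop = B's two passes, for any starting accumulator / mapping
theorem outer_eq (db : List (List String)) (acc : List Int) (m : PySem.Dict String Int) :
    db.foldl aOuter (acc, m, (m.size : Int)) =
      (acc ++ db.map (fun t => bMask t (db.foldl bAddT m)),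
       db.foldl bAddT m, ((db.foldl bAddT m).size : Int)) := by
  induction db generalizing acc m with
  | nil => simp
  | cons t db ih =>
    simp only [List.foldl_cons, List.map_cons]
    have houter : aOuter (acc, m, (m.size : Int)) t
        = (acc ++ [bMask t (db.foldl bAddT (bAddT m t))], bAddT m t, ((bAddT m t).size : Int)) := by
      unfold aOuter
      rw [inner_eq t m 0]
      have hm : t.foldl (fun acc item =>
            PySem.Int.bor acc ((1 : Int) <<< ((bAddT m t).getD item 0).toNat)) 0
          = bMask t (db.foldl bAddT (bAddT m t)) := by
        unfold bMask
        refine PySem.List.foldl_congr_mem _ _ _ _ (fun a x hx => ?_)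
        rw [getD_foldl_bAddT_of_contains db (bAddT m t) x (contains_bAddT_of_mem t m x hx)]
      rw [hm]
    rw [houter, ih]
    simp

-- ===== VERDICT (by name: the statement is the Claim_ definition above) =====
theorem init_transactions_spec : Claim_equal_init_transactions := by
  intro database _
  unfold Spec_init_transactions init_transactions init_transactions_alt
  have h0 : (0 : Int) = ((PySem.Dict.empty : PySem.Dict String Int).size : Int) := by
    simp [PySem.Dict.size_empty]
  rw [h0, outer_eq database [] PySem.Dict.empty]
  simp
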